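-- pv_equiv track=rewrite | github.com/SumitKPandit/foobar | bunny-prisoner-locating/bunny-prisoner-locating-v1.py | solution
-- ===== SOURCE A (Python) =====
-- def solution(x, y):
--     cells = []
--     i = 1
--     counter = {}
--     last_number = {'x': 0, 'y': 0}
--     while True:
--         if len(cells) == 0:
--             cells.append([])
--             cells[0].append(i)
--             counter[0] = 1
--             last_number['x'] = 0
--             last_number['y'] = 0
--             i += 1
--             continue
--         if last_number['y'] == 0:
--             cells[0].append(i)
--             counter[0] += 1
--             last_number['x'] = 0
--             last_number['y'] = counter[0] - 1
--         elif last_number['y'] == 1: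
--             cells.append([])
--             cells[last_number['x'] + 1].append(i)
--             counter[last_number['x'] + 1] = 1
--             last_number['x'] += 1
--             last_number['y'] = 0
--         else:
--             cells[last_number['x'] + 1].append(i)
--             counter[last_number['x'] + 1] += 1
--             last_number['x'] += 1
--             last_number['y'] -= 1
--         if last_number['x'] == x and last_number['y'] == y:
--             break
--         i += 1
--     return str(cells[x - 1][y - 1])
-- ===== SOURCE B (Python) =====
-- def solution(x, y):
--     return str((x + y - 2) * (x + y - 1) // 2 + x)
-- ===== Notes on version B (the rewrite author's own statement) =====
-- stated objective: faster
-- what changed: replaces the cell-by-cell simulation that builds the whole triangular grid with the closed-form triangular-number formula (x+y-2)*(x+y-1)//2 + x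
-- intended difference: On the boundary x=0 or y=0 (inside Pre_: y=0 with x>=1, and (0,1)) A returns a value picked up by Python negative-index wraparound in cells[x-1][y-1] (e.g. (1,0) -> '2', (0,1) -> '1'), while B returns the closed-form extension ('1' resp. '0'), which is the intended continuation of the grid formula. — e.g. on solution(1, 0): A returns "2", B returns "1"
import Mathlib
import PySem

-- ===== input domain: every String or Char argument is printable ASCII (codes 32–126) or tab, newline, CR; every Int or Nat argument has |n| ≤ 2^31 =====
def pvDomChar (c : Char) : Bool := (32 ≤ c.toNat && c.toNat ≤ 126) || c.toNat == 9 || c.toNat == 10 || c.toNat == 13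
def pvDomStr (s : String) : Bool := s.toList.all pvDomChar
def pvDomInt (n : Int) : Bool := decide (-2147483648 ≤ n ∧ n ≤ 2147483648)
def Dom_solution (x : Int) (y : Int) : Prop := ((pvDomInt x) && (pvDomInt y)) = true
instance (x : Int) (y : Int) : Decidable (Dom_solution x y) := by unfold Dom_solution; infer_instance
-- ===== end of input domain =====

-- B replaces A's cell-by-cell simulation of the diagonally-filled grid by the closed-form
-- triangular-number formula; equivalence is proved on x ≥ 1 ∧ y ≥ 0 (plus (0,1)), with the
-- x = 0 / y = 0 boundary declared as an intended difference (A's value there comes from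
-- Python negative-index wraparound).

-- ===== PORT A =====
-- cells[idx].append(v)   (idx always in range when A reaches this statement)
def pyAppendAt (l : List (List Int)) (idx : Int) (v : Int) : List (List Int) :=
  PySem.List.pySetD l idx (PySem.List.pyGetD l idx [] ++ [v])

-- the while-True loop of A; fuel counts loop iterations (A's loop terminates by `break`)
def loopA (x y : Int) : Nat → List (List Int) → PySem.Dict Int Int → Int → Int → Int → List (List Int)
  | 0, cells, _, _, _, _ => cells
  | Nat.succ n, cells, counter, lx, ly, i =>
    if cells = [] then
      loopA x y n [[i]] (counter.insert 0 1) 0 0 (i + 1)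
    else
      let st :=
        if ly = 0 then
          let c0 := counter.getD 0 0 + 1
          (pyAppendAt cells 0 i, counter.insert 0 c0, (0 : Int), c0 - 1)
        else if ly = 1 then
          (pyAppendAt (cells ++ [[]]) (lx + 1) i, counter.insert (lx + 1) 1, lx + 1, (0 : Int))
        else
          (pyAppendAt cells (lx + 1) i, counter.insert (lx + 1) (counter.getD (lx + 1) 0 + 1),
            lx + 1, ly - 1)
      if st.2.2.1 = x ∧ st.2.2.2 = y then st.1
      else loopA x y n st.1 st.2.1 st.2.2.1 st.2.2.2 (i + 1)

def solution (x : Int) (y : Int) : String :=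
  let fuel := (PySem.Int.floordiv ((x + y) * (x + y + 1)) 2 + x + 1).toNat
  let cells := loopA x y fuel [] PySem.Dict.empty 0 0 1
  match PySem.List.pyGet? cells (x - 1) with
  | some row =>
    match PySem.List.pyGet? row (y - 1) with
    | some v => PySem.Int.toStr v
    | none => ""          -- IndexError in A: outside Pre_solution
  | none => ""            -- IndexError in A: outside Pre_solution

-- ===== PORT B =====
def solution_alt (x : Int) (y : Int) : String :=
  PySem.Int.toStr (PySem.Int.floordiv ((x + y - 2) * (x + y - 1)) 2 + x)

-- ===== PRECONDITION & SPEC =====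
-- Pre_ excludes only inputs where A never returns: it diverges for x < 0, y < 0 or (0,0)
-- (the break condition is never reached) and raises IndexError for x = 0, y ≥ 2.
def Pre_solution (x : Int) (y : Int) : Prop := (1 ≤ x ∧ 0 ≤ y) ∨ (x = 0 ∧ y = 1)
instance (x : Int) (y : Int) : Decidable (Pre_solution x y) := by unfold Pre_solution; infer_instance
def pvWitness_solution : Int × Int := (1, 1)

-- On the boundary x = 0 or y = 0, A returns a grid value hit by Python negative-index
-- wraparound in cells[x-1][y-1] (e.g. '2' at (1,0), '1' at (0,1)); B returns the closed-form
-- extension ('1' resp. '0'), the intended continuation of the grid formula.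
def D_solution (x : Int) (y : Int) : Prop := x = 0 ∨ y = 0
instance (x : Int) (y : Int) : Decidable (D_solution x y) := by unfold D_solution; infer_instance

def Spec_solution (x : Int) (y : Int) (out : String) : Prop :=
  ¬ D_solution x y → out = solution_alt x y
instance (x : Int) (y : Int) (out : String) : Decidable (Spec_solution x y out) := by
  unfold Spec_solution; infer_instance

def pvDiffWitness_solution : Int × Int := (1, 0)
def pvDiffWitnessOut_solution : String × String := ("2", "1")

-- ===== CLAIM (what is proved, stated in full; the proofs are below) =====
def Claim_unchanged_solution : Prop :=
  ∀ (x : Int) (y : Int), Dom_solution x y → Pre_solution x y → Spec_solution x y (solution x y)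
def Claim_changed_solution : Prop :=
  Dom_solution (pvDiffWitness_solution.1) (pvDiffWitness_solution.2) ∧
  Pre_solution (pvDiffWitness_solution.1) (pvDiffWitness_solution.2) ∧
  D_solution (pvDiffWitness_solution.1) (pvDiffWitness_solution.2) ∧
  solution (pvDiffWitness_solution.1) (pvDiffWitness_solution.2) = pvDiffWitnessOut_solution.1 ∧
  solution_alt (pvDiffWitness_solution.1) (pvDiffWitness_solution.2) = pvDiffWitnessOut_solution.2 ∧
  pvDiffWitnessOut_solution.1 ≠ pvDiffWitnessOut_solution.2

-- ===== LEMMAS AND PROOFS =====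

-- triangular numbers and the value at 0-indexed grid position (r, c)
def tri (s : Nat) : Nat := s * (s + 1) / 2
def fval (r c : Nat) : Int := (tri (r + c) : Int) + r + 1
-- length of row r of the grid the moment position (a, b) (with s = a + b) has been filled
def rowLen (s a r : Nat) : Nat := (s - r) + (if r ≤ a then 1 else 0)
-- the grid (A's `cells`) the moment position (a, b) has just been filled
def gridspec (a b : Nat) : List (List Int) :=
  (List.range (a + b + (if b = 0 then 1 else 0))).map
    (fun r => (List.range (rowLen (a + b) a r)).map (fun c => fval r c))
-- 1-based sequence number of position (a, b) in A's fill order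
def posN (a b : Nat) : Nat := tri (a + b) + a + 1

theorem two_tri (n : Nat) : 2 * tri n = n * (n + 1) := by
  have h : 2 ∣ n * (n + 1) := (Nat.even_mul_succ_self n).two_dvd
  unfold tri
  omega

theorem tri_succ (n : Nat) : tri (n + 1) = tri n + (n + 1) := by
  have h1 := two_tri n
  have h2 := two_tri (n + 1)
  nlinarith

theorem tri_mono {m n : Nat} (h : m ≤ n) : tri m ≤ tri n := by
  unfold tri
  exact Nat.div_le_div_right (Nat.mul_le_mul h (by omega))

theorem posN_inj {a b c d : Nat} (h : posN a b = posN c d) : a = c ∧ b = d := by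
  unfold posN at h
  rcases Nat.lt_trichotomy (a + b) (c + d) with hlt | heq | hgt
  · have h1 : tri (a + b + 1) ≤ tri (c + d) := tri_mono hlt
    have h2 := tri_succ (a + b)
    omega
  · rw [heq] at h
    omega
  · have h1 : tri (c + d + 1) ≤ tri (a + b) := tri_mono hgt
    have h2 := tri_succ (c + d)
    omega

theorem pyAppendAt_map_range (g : Nat → List Int) (R j : Nat) (hj : j < R) (v : Int) :
    pyAppendAt ((List.range R).map g) ((j : Nat) : Int) v =
      (List.range R).map (fun r => if r = j then g r ++ [v] else g r) := by
  unfold pyAppendAt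
  rw [PySem.List.pySetD_natCast, PySem.List.pyGetD_natCast]
  apply List.ext_getElem
  · simp
  · intro i h1 h2
    simp only [List.getElem_set, List.getElem_map, List.getElem_range]
    have hg : ((List.range R).map g).getD j [] = g j := by
      rw [List.getD_eq_getElem _ _ (by simpa using hj)]
      simp
    rw [hg]
    by_cases hij : i = j <;> simp [hij]
    omega

theorem gridspec_ne_nil (a b : Nat) : gridspec a b ≠ [] := by
  unfold gridspec
  have : 0 < a + b + (if b = 0 then 1 else 0) := by split <;> omega
  intro hcon
  have := congrArg List.length hcon
  simp at this
  omega

-- the three grid-update lemmas, one per branch of A's loop body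
theorem grid_b0 (a : Nat) :
    pyAppendAt (gridspec a 0) 0 (↑(posN a 0) + 1) = gridspec 0 (a + 1) := by
  unfold gridspec
  norm_num
  have h := pyAppendAt_map_range (fun r => (List.range (rowLen a a r)).map (fval r))
      (a + 1) 0 (by omega) (↑(posN a 0) + 1)
  rw [show (((0 : Nat)) : Int) = (0 : Int) from rfl] at h
  rw [h]
  apply List.ext_getElem
  · simp
  · intro i h1 h2
    simp only [List.getElem_map, List.getElem_range]
    simp only [List.length_map, List.length_range] at h1
    by_cases hi : i = 0
    · subst hi
      have hlen0 : rowLen a a 0 = a + 1 := by unfold rowLen; simp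
      have hlen0' : rowLen (a + 1) 0 0 = a + 2 := by unfold rowLen; simp
      have hv : (↑(posN a 0) + 1 : Int) = fval 0 (a + 1) := by
        have ht := tri_succ a
        unfold posN fval
        simp only [Nat.add_zero, Nat.zero_add]
        push_cast [ht]
        ring
      rw [hlen0, hlen0', hv, show a + 2 = (a + 1) + 1 from rfl,
        List.range_succ (n := a + 1), List.map_append]
      simp
    · simp only [if_neg hi]
      have hlen : rowLen a a i = rowLen (a + 1) 0 i := by
        unfold rowLen
        rw [if_pos (by omega : i ≤ a), if_neg (by omega : ¬ i ≤ 0)]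
        omega
      rw [hlen]

theorem grid_b1 (a : Nat) :
    pyAppendAt (gridspec a 1 ++ [[]]) ((a : Int) + 1) (↑(posN a 1) + 1) = gridspec (a + 1) 0 := by
  unfold gridspec pyAppendAt
  norm_num
  rw [show ((a : Int) + 1) = (((a + 1 : Nat)) : Int) by push_cast; ring]
  rw [PySem.List.pySetD_natCast, PySem.List.pyGetD_natCast]
  have hget :
      (List.map (fun r => List.map (fun c => fval r c) (List.range (rowLen (a + 1) a r)))
          (List.range (a + 1)) ++ [[]]).getD (a + 1) ([] : List Int) = ([] : List Int) := by
    rw [List.getD_eq_getElem _ _ (by simp)]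
    rw [List.getElem_append_right (by simp)]
    simp
  rw [hget]
  apply List.ext_getElem
  · simp
  · intro i h1 h2
    simp only [List.length_set, List.length_append, List.length_map, List.length_range,
      List.length_cons, List.length_nil] at h1
    simp only [List.getElem_set, List.getElem_map, List.getElem_range]
    by_cases hi : i = a + 1
    · subst hi
      have hlen : rowLen (a + 1 + 0) (a + 1) (a + 1) = 1 := by unfold rowLen; simp
      have hv : (↑(posN a 1) + 1 : Int) = fval (a + 1) 0 := by
        unfold posN fval
        push_cast
        ring
      rw [hlen]
      simp [hv]
    · rw [if_neg (by omega : ¬ a + 1 = i)]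
      rw [List.getElem_append_left (by simp; omega)]
      simp only [List.getElem_map, List.getElem_range]
      have hlen : rowLen (a + 1) a i = rowLen (a + 1 + 0) (a + 1) i := by
        unfold rowLen
        rw [if_pos (by omega : i ≤ a), if_pos (by omega : i ≤ a + 1)]
      rw [hlen]

theorem grid_b2 (a b : Nat) (hb : 2 ≤ b) :
    pyAppendAt (gridspec a b) ((a : Int) + 1) (↑(posN a b) + 1) = gridspec (a + 1) (b - 1) := by
  obtain ⟨b', rfl⟩ : ∃ b', b = b' + 2 := ⟨b - 2, by omega⟩
  unfold gridspec
  norm_num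
  have h := pyAppendAt_map_range
      (fun r => (List.range (rowLen (a + (b' + 2)) a r)).map (fval r))
      (a + (b' + 2)) (a + 1) (by omega) (↑(posN a (b' + 2)) + 1)
  rw [show (((a + 1 : Nat)) : Int) = ((a : Int) + 1) by push_cast; ring] at h
  rw [h]
  apply List.ext_getElem
  · simp
    omega
  · intro i h1 h2
    simp only [List.getElem_map, List.getElem_range]
    simp only [List.length_map, List.length_range] at h1
    by_cases hi : i = a + 1
    · subst hi
      have hlen : rowLen (a + (b' + 2)) a (a + 1) = b' + 1 := by
        unfold rowLen
        rw [if_neg (by omega : ¬ a + 1 ≤ a)]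
        omega
      have hlen' : rowLen (a + 1 + (b' + 1)) (a + 1) (a + 1) = b' + 2 := by
        unfold rowLen
        rw [if_pos (le_refl (a + 1))]
        omega
      have hv : (↑(posN a (b' + 2)) + 1 : Int) = fval (a + 1) (b' + 1) := by
        unfold posN fval
        rw [show a + 1 + (b' + 1) = a + (b' + 2) by omega]
        push_cast
        ring
      rw [hlen, hlen', hv, show b' + 2 = (b' + 1) + 1 from rfl,
        List.range_succ (n := b' + 1), List.map_append]
      simp
    · rw [if_neg hi]
      have hlen : rowLen (a + (b' + 2)) a i = rowLen (a + 1 + (b' + 1)) (a + 1) i := by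
        unfold rowLen
        by_cases hia : i ≤ a
        · rw [if_pos hia, if_pos (by omega : i ≤ a + 1)]
          omega
        · rw [if_neg hia, if_neg (by omega : ¬ i ≤ a + 1)]
          omega
      rw [hlen]

theorem loop_inv (k : Nat) (x y : Int) (a b : Nat) (counter : PySem.Dict Int Int)
    (hx : 0 ≤ x) (hy : 0 ≤ y)
    (hc : counter.getD 0 0 = ((a + b : Nat) : Int) + 1)
    (hk : 1 ≤ k)
    (hN : posN x.toNat y.toNat = posN a b + k) :
    loopA x y k (gridspec a b) counter a b (↑(posN a b) + 1) = gridspec x.toNat y.toNat := by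
  induction k generalizing a b counter with
  | zero => omega
  | succ k ih =>
    rw [loopA, if_neg (gridspec_ne_nil a b)]
    rcases b with _ | b
    · -- branch ly == 0
      have hstep : posN 0 (a + 1) = posN a 0 + 1 := by
        unfold posN
        simp only [Nat.zero_add, Nat.add_zero, tri_succ]
        omega
      have hcell : pyAppendAt (gridspec a 0) 0 (↑(posN a 0) + 1) = gridspec 0 (a + 1) := grid_b0 a
      simp only [Nat.cast_zero, hc]
      rw [if_pos (trivial : True)]
      simp only [hcell]
      by_cases hfin : (0 : Int) = x ∧ (↑(a + 0) : Int) + 1 + 1 - 1 = y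
      · rw [if_pos hfin]
        obtain ⟨hx0, hy0⟩ := hfin
        push_cast at hy0
        rw [show x.toNat = 0 by omega, show y.toNat = a + 1 by omega]
      · rw [if_neg hfin]
        rcases Nat.eq_zero_or_pos k with hk0 | hkpos
        · exfalso
          subst hk0
          have hinj := posN_inj (show posN x.toNat y.toNat = posN 0 (a + 1) by omega)
          refine hfin ⟨by omega, by push_cast; omega⟩
        · have hrec := ih 0 (a + 1) (counter.insert 0 ((↑(a + 0) : Int) + 1 + 1))
            (by rw [PySem.Dict.getD_insert_self]; push_cast; ring) hkpos (by omega)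
          convert hrec using 2 <;> push_cast [hstep] <;> ring
    · rw [if_neg (by push_cast; omega : ¬ ((b + 1 : Nat) : Int) = 0)]
      rcases b with _ | b
      · -- branch ly == 1
        simp only [Nat.zero_add] at hc hN ⊢
        have hstep : posN (a + 1) 0 = posN a 1 + 1 := by
          unfold posN
          simp only [Nat.add_zero]
          omega
        have hcell : pyAppendAt (gridspec a 1 ++ [[]]) ((a : Int) + 1) (↑(posN a 1) + 1) =
            gridspec (a + 1) 0 := grid_b1 a
        rw [if_pos (by norm_num : ((1 : Nat) : Int) = 1)]
        simp only [hcell]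
        by_cases hfin : (a : Int) + 1 = x ∧ (0 : Int) = y
        · rw [if_pos hfin]
          obtain ⟨hx0, hy0⟩ := hfin
          rw [show x.toNat = a + 1 by omega, show y.toNat = 0 by omega]
        · rw [if_neg hfin]
          rcases Nat.eq_zero_or_pos k with hk0 | hkpos
          · exfalso
            subst hk0
            have hinj := posN_inj (show posN x.toNat y.toNat = posN (a + 1) 0 by omega)
            refine hfin ⟨by omega, by omega⟩
          · have hrec := ih (a + 1) 0 (counter.insert ((a : Int) + 1) 1)
              (by
                rw [PySem.Dict.getD_insert_of_ne _ _ _ (by omega : (0 : Int) ≠ (a : Int) + 1),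
                  hc])
              hkpos (by omega)
            exact hrec
      · -- branch ly >= 2 (else)
        have hstep : posN (a + 1) (b + 1) = posN a (b + 1 + 1) + 1 := by
          unfold posN
          rw [show a + 1 + (b + 1) = a + (b + 1 + 1) by omega]
          omega
        have hcell : pyAppendAt (gridspec a (b + 1 + 1)) ((a : Int) + 1) (↑(posN a (b + 1 + 1)) + 1) =
            gridspec (a + 1) (b + 1) := by
          have h := grid_b2 a (b + 1 + 1) (by omega)
          simpa using h
        rw [if_neg (by push_cast; omega : ¬ ((b + 1 + 1 : Nat) : Int) = 1)]
        simp only [hcell]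
        by_cases hfin : (a : Int) + 1 = x ∧ ((b + 1 + 1 : Nat) : Int) - 1 = y
        · rw [if_pos hfin]
          obtain ⟨hx0, hy0⟩ := hfin
          push_cast at hy0
          rw [show x.toNat = a + 1 by omega, show y.toNat = b + 1 by omega]
        · rw [if_neg hfin]
          rcases Nat.eq_zero_or_pos k with hk0 | hkpos
          · exfalso
            subst hk0
            have hinj := posN_inj (show posN x.toNat y.toNat = posN (a + 1) (b + 1) by omega)
            refine hfin ⟨by omega, by push_cast; omega⟩
          · have hrec := ih (a + 1) (b + 1)
              (counter.insert ((a : Int) + 1) (counter.getD ((a : Int) + 1) 0 + 1))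
              (by
                rw [PySem.Dict.getD_insert_of_ne _ _ _ (by omega : (0 : Int) ≠ (a : Int) + 1)]
                rw [hc]; push_cast; ring)
              hkpos (by omega)
            convert hrec using 2 <;> push_cast [hstep] <;> ring

-- final characterisation of A on the terminating region
theorem solution_eq_grid (x y : Int) (hx : 0 ≤ x) (hy : 0 ≤ y) (hxy : 1 ≤ x + y) :
    solution x y =
      match PySem.List.pyGet? (gridspec x.toNat y.toNat) (x - 1) with
      | some row =>
        match PySem.List.pyGet? row (y - 1) with
        | some v => PySem.Int.toStr v
        | none => ""
      | none => "" := by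
  have hfuel : (PySem.Int.floordiv ((x + y) * (x + y + 1)) 2 + x + 1).toNat = posN x.toNat y.toNat := by
    have hxy' : x + y = ((x.toNat + y.toNat : Nat) : Int) := by omega
    rw [hxy']
    rw [show ((x.toNat + y.toNat : Nat) : Int) * (((x.toNat + y.toNat : Nat) : Int) + 1) =
        (((x.toNat + y.toNat) * (x.toNat + y.toNat + 1) : Nat) : Int) by push_cast; ring]
    rw [show (2 : Int) = ((2 : Nat) : Int) from rfl,
      PySem.Int.floordiv_natCast ((x.toNat + y.toNat) * (x.toNat + y.toNat + 1)) 2]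
    unfold posN tri
    omega
  have hp00 : posN 0 0 = 1 := rfl
  obtain ⟨m, hm⟩ : ∃ m, posN x.toNat y.toNat = m + 1 :=
    ⟨posN x.toNat y.toNat - 1, by unfold posN; omega⟩
  have hgrid0 : [[(1 : Int)]] = gridspec 0 0 := by decide
  rcases Nat.eq_zero_or_pos m with hm0 | hmpos
  · exfalso
    subst hm0
    have hinj := posN_inj (show posN x.toNat y.toNat = posN 0 0 by omega)
    omega
  · have hrun := loop_inv m x y 0 0 (PySem.Dict.empty.insert 0 1) hx hy
      (by rw [PySem.Dict.getD_insert_self]; norm_num) hmpos (by omega)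
    unfold solution
    simp only [hfuel, hm]
    rw [loopA, if_pos rfl]
    rw [show loopA x y m [[(1 : Int)]] (PySem.Dict.empty.insert 0 1) 0 0 (1 + 1) =
        gridspec x.toNat y.toNat by
      rw [hgrid0]
      exact hrun]

-- ===== VERDICT (by name: the statement is the Claim_ definition above) =====
theorem solution_spec : Claim_unchanged_solution := by
  intro x y hdom hpre
  unfold Spec_solution
  intro hD
  unfold D_solution at hD
  unfold Pre_solution at hpre
  have hx1 : 1 ≤ x := by omega
  have hy1 : 1 ≤ y := by omega
  obtain ⟨x1, hx'⟩ : ∃ x1 : Nat, x.toNat = x1 + 1 := ⟨x.toNat - 1, by omega⟩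
  obtain ⟨y1, hy'⟩ : ∃ y1 : Nat, y.toNat = y1 + 1 := ⟨y.toNat - 1, by omega⟩
  rw [solution_eq_grid x y (by omega) (by omega) (by omega), hx', hy']
  unfold gridspec
  rw [if_neg (by omega : ¬ y1 + 1 = 0)]
  rw [show x - 1 = ((x1 : Nat) : Int) by omega]
  rw [PySem.List.pyGet?_natCast]
  rw [List.getElem?_eq_getElem (by simp; omega)]
  simp only [List.getElem_map, List.getElem_range]
  rw [show rowLen (x1 + 1 + (y1 + 1)) (x1 + 1) x1 = y1 + 3 by
    unfold rowLen; rw [if_pos (by omega : x1 ≤ x1 + 1)]; omega]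
  rw [show y - 1 = ((y1 : Nat) : Int) by omega]
  rw [PySem.List.pyGet?_natCast]
  rw [List.getElem?_eq_getElem (by simp)]
  simp only [List.getElem_map, List.getElem_range]
  show PySem.Int.toStr (fval x1 y1) = solution_alt x y
  unfold solution_alt fval
  congr 1
  rw [show x + y - 2 = ((x1 + y1 : Nat) : Int) by omega,
    show x + y - 1 = ((x1 + y1 + 1 : Nat) : Int) by omega]
  rw [show ((x1 + y1 : Nat) : Int) * ((x1 + y1 + 1 : Nat) : Int) =
      (((x1 + y1) * (x1 + y1 + 1) : Nat) : Int) by push_cast; ring]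
  rw [show (2 : Int) = ((2 : Nat) : Int) from rfl,
    PySem.Int.floordiv_natCast ((x1 + y1) * (x1 + y1 + 1)) 2]
  unfold tri
  omega

theorem solution_changed : Claim_changed_solution := by
  unfold Claim_changed_solution; decide
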